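-- pv_equiv track=rewrite | github.com/Ardra/Python-Practice-Solutions | chapter2/pbm16.py | extsort
-- ===== SOURCE A (Python) =====
-- def extsort(list):
--     new_list=[]
--     for x in list:
--         '''split each element to list append that element list to new_list'''
--         new_list.append(x.split('.'))
--     new_list.sort(key = lambda x: x[1])#this new_list is sorted
--     '''next step combine members in list by '.'.join'''
--     list=[]
--     for x in new_list:
--         list.append('.'. join(x))
--     return list
-- ===== SOURCE B (Python) =====
-- def extsort(list):
--     out = []
--     for s in list:
--         k = s.split('.')[1]
--         i = 0
--         while i < len(out) and out[i].split('.')[1] <= k: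
--             i += 1
--         out.insert(i, s)
--     return out
-- ===== Notes on version B (the rewrite author's own statement) =====
-- stated objective: alternative
-- what changed: B replaces A's decorate/library-sort/rejoin pipeline (build a list of split fields, call list.sort with a key, rejoin with '.') by a hand-written stable insertion sort: one pass over the input inserting each original string into an accumulator after all entries whose second dot-field is <= its own; no split lists are materialized or rejoined and no library sort is used.
-- outside the precondition, e.g. on extsort(['nodot']): A raises IndexError, B raises IndexError
import Mathlib
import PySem

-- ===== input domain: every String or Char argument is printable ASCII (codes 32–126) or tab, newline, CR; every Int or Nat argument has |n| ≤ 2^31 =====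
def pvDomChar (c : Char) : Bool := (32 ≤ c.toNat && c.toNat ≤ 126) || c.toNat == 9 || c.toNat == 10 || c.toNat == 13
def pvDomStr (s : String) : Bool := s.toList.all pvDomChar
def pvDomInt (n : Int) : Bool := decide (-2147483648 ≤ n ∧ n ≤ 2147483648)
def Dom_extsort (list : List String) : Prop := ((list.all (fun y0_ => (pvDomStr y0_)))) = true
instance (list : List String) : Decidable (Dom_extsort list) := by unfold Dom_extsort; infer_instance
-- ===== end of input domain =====

-- B replaces A's decorate/library-sort/rejoin pipeline by a hand-written stable
-- insertion sort of the original strings (objective: alternative); it builds no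
-- split lists and calls no library sort.

-- x.split('.'): the separator "." is non-empty, so Str.split? always returns some;
-- the .getD [] default is never reached.
def pvSplitDot (x : String) : List String := (PySem.Str.split? x ".").getD []

-- x[1] on the split list: Python raises IndexError when the list has < 2 elements;
-- Pre_extsort excludes exactly those inputs, so the .getD "" default is never reached
-- on admitted inputs.
def pvKey1 (x : List String) : String := (PySem.List.pyGet? x 1).getD ""

-- ===== PORT A =====
def extsort (list : List String) : List String :=
  -- new_list = [x.split('.') for x in list]   (appending loop)
  let new_list : List (List String) := list.foldl (fun acc x => acc ++ [pvSplitDot x]) []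
  -- new_list.sort(key = lambda x: x[1])  (Python sort is stable; so is PySem.List.sorted)
  let sorted_list := PySem.List.sorted new_list pvKey1
  -- list = ['.'.join(x) for x in sorted_list]  (appending loop)
  sorted_list.foldl (fun acc x => acc ++ [PySem.Str.join "." x]) []

-- ===== PORT B =====
-- B's while-loop + list.insert: walk past every entry whose second dot-field is
-- <= k, insert s there (structural recursion on the accumulator).
def pvInsertKeyed (s k : String) : List String → List String
  | [] => [s]
  | y :: ys => if pvKey1 (pvSplitDot y) ≤ k then y :: pvInsertKeyed s k ys else s :: y :: ys

def extsort_alt (list : List String) : List String :=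
  -- for s in list: k = s.split('.')[1]; insert s into out after keys <= k
  list.foldl (fun out s => pvInsertKeyed s (pvKey1 (pvSplitDot s)) out) []

-- ===== PRECONDITION & SPEC =====
-- Pre_ excludes inputs containing a string without a '.', on which Python A (and B)
-- raise IndexError at x.split('.')[1].
def Pre_extsort (list : List String) : Prop :=
  ∀ s ∈ list, PySem.Str.isIn "." s = true
instance (list : List String) : Decidable (Pre_extsort list) := by unfold Pre_extsort; infer_instance

def pvWitness_extsort : List String := ["b.a", "a.c.z", "c.b"]

def Spec_extsort (list : List String) (out : List String) : Prop := out = extsort_alt list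
instance (list : List String) (out : List String) : Decidable (Spec_extsort list out) := by unfold Spec_extsort; infer_instance

-- ===== CLAIM (what is proved, stated in full; the proofs are below) =====
def Claim_equal_extsort : Prop := ∀ (list : List String), Dom_extsort list → Pre_extsort list → Spec_extsort list (extsort list)

-- ===== LEMMAS AND PROOFS =====

-- the appending foldl is map
theorem foldl_append_singleton {α β : Type} (f : α → β) (xs : List α) (acc : List β) :
    xs.foldl (fun acc x => acc ++ [f x]) acc = acc ++ xs.map f := by
  induction xs generalizing acc with
  | nil => simp
  | cons x xs ih => simp [List.foldl, ih]

-- insertBy commutes with map when the comparison factors through f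
theorem insertBy_map {α β : Type} (f : α → β) (bef : β → β → Bool) (x : α) (ys : List α) :
    PySem.List.insertBy bef (f x) (ys.map f)
      = (PySem.List.insertBy (fun a b => bef (f a) (f b)) x ys).map f := by
  induction ys with
  | nil => simp [PySem.List.insertBy]
  | cons y ys ih =>
      simp only [List.map, PySem.List.insertBy]
      by_cases h : bef (f x) (f y) = true <;> simp [h, ih]

-- stable sort commutes with map: sorting map f xs by key = mapping f over xs sorted by key ∘ f
theorem sorted_map {α β κ : Type} [LT κ] [DecidableLT κ] (f : α → β) (key : β → κ) (xs : List α) :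
    PySem.List.sorted (xs.map f) key = (PySem.List.sorted xs (fun a => key (f a))).map f := by
  rw [PySem.List.sorted_eq_foldl_insertBy, PySem.List.sorted_eq_foldl_insertBy]
  have h : ∀ (acc : List α),
      (xs.map f).foldl (fun acc x => PySem.List.insertBy (fun a b => decide (key a < key b)) x acc) (acc.map f)
        = (xs.foldl (fun acc x => PySem.List.insertBy (fun a b => decide (key (f a) < key (f b))) x acc) acc).map f := by
    induction xs with
    | nil => intro acc; simp
    | cons x xs ih =>
        intro acc
        simp only [List.map, List.foldl]
        rw [insertBy_map f (fun a b => decide (key a < key b)) x acc]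
        exact ih _
  simpa using h []

-- join of a cons with a nonempty tail
theorem join_cons_ne (sep a : List Char) (ys : List (List Char)) (h : ys ≠ []) :
    PySem.Chars.join sep (a :: ys) = a ++ sep ++ PySem.Chars.join sep ys := by
  cases ys with
  | nil => exact absurd rfl h
  | cons b ys => exact PySem.Chars.join_cons_cons sep a b ys

-- join sep (xs ++ [p, q]) = join sep (xs ++ [p ++ sep ++ q])
theorem join_snoc_snoc (sep p q : List Char) (xs : List (List Char)) :
    PySem.Chars.join sep (xs ++ [p, q]) = PySem.Chars.join sep (xs ++ [p ++ sep ++ q]) := by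
  induction xs with
  | nil =>
      rw [List.nil_append, List.nil_append, PySem.Chars.join_cons_cons,
        PySem.Chars.join_singleton, PySem.Chars.join_singleton]
  | cons a xs ih =>
      rw [List.cons_append, List.cons_append,
        join_cons_ne sep a _ (by simp), join_cons_ne sep a _ (by simp), ih]

-- loop invariant of splitOn.go: joining the produced pieces reproduces accumulated state
theorem join_splitOn_go (sep : List Char) (hsep : sep ≠ []) :
    ∀ (fuel : Nat) (l cur : List Char) (acc : List (List Char)),
      l.length < fuel →
      PySem.Chars.join sep (PySem.Chars.splitOn.go sep fuel l cur acc)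
        = PySem.Chars.join sep (acc.reverse ++ [cur.reverse ++ l]) := by
  intro fuel
  induction fuel with
  | zero => intro l cur acc h; omega
  | succ fuel ih =>
      intro l cur acc h
      cases l with
      | nil => simp [PySem.Chars.splitOn.go]
      | cons c rest =>
          rw [PySem.Chars.splitOn.go]
          by_cases hp : sep.isPrefixOf (c :: rest) = true
          · simp only [hp, if_true]
            obtain ⟨t, ht⟩ := List.isPrefixOf_iff_prefix.mp hp
            have hlen : (List.drop sep.length (c :: rest)).length < fuel := by
              have h1 : 0 < sep.length := List.length_pos_of_ne_nil hsep
              simp only [List.length_drop, List.length_cons] at h ⊢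
              omega
            rw [ih _ _ _ hlen]
            rw [← ht, List.drop_left]
            simp only [List.reverse_cons, List.reverse_nil, List.nil_append]
            have e : acc.reverse ++ [cur.reverse] ++ [t] = acc.reverse ++ [cur.reverse, t] := by
              simp
            rw [e, join_snoc_snoc]
            simp [List.append_assoc]
          · simp only [hp, Bool.false_eq_true, if_false]
            rw [ih _ _ _ (by simp only [List.length_cons] at h ⊢; omega)]
            simp

-- '.'.join(x.split('.')) == x  (character-list level)
theorem join_splitOn (sep s : List Char) (hsep : sep ≠ []) :
    PySem.Chars.join sep (PySem.Chars.splitOn s sep) = s := by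
  unfold PySem.Chars.splitOn
  rw [join_splitOn_go sep hsep _ _ _ _ (by omega)]
  simp

-- '.'.join(x.split('.')) == x  (string level, through the split? bridge)
theorem join_pvSplitDot (x : String) : PySem.Str.join "." (pvSplitDot x) = x := by
  unfold pvSplitDot
  have hb := PySem.Str.split?_map x "."
  have hsep : (".".toList : List Char).isEmpty = false := by decide
  rw [PySem.Chars.split?] at hb
  simp only [hsep, Bool.false_eq_true, if_false] at hb
  cases hsplit : PySem.Str.split? x "." with
  | none => rw [hsplit] at hb; simp at hb
  | some pieces =>
      rw [hsplit] at hb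
      simp only [Option.map_some, Option.some.injEq] at hb
      simp only [Option.getD_some]
      unfold PySem.Str.join
      rw [hb, join_splitOn _ _ (by decide)]
      exact String.ofList_toList

-- A = the stable keyed sort of the original strings
theorem extsort_eq_sorted (list : List String) :
    extsort list = PySem.List.sorted list (fun s => pvKey1 (pvSplitDot s)) := by
  unfold extsort
  simp only
  rw [foldl_append_singleton pvSplitDot list [], List.nil_append]
  rw [sorted_map pvSplitDot pvKey1 list]
  rw [foldl_append_singleton (PySem.Str.join "." ·) _ [], List.nil_append]
  rw [List.map_map]
  have : (PySem.Str.join "." ·) ∘ pvSplitDot = id := by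
    funext x; exact join_pvSplitDot x
  rw [this, List.map_id]

-- B's keyed insertion = insertBy with the strict key comparison ('<=' scan-past vs '<' insert-before)
theorem pvInsertKeyed_eq_insertBy (s : String) (ys : List String) :
    pvInsertKeyed s (pvKey1 (pvSplitDot s)) ys
      = PySem.List.insertBy
          (fun a b => decide (pvKey1 (pvSplitDot a) < pvKey1 (pvSplitDot b))) s ys := by
  induction ys with
  | nil => simp [pvInsertKeyed, PySem.List.insertBy]
  | cons y ys ih =>
      simp only [pvInsertKeyed, PySem.List.insertBy]
      by_cases h : pvKey1 (pvSplitDot y) ≤ pvKey1 (pvSplitDot s)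
      · rw [if_pos h, if_neg (by simpa using not_lt.mpr h), ih]
      · rw [if_neg h, if_pos (by simpa using lt_of_not_ge h)]

-- B = the stable keyed sort of the original strings
theorem extsort_alt_eq_sorted (list : List String) :
    extsort_alt list = PySem.List.sorted list (fun s => pvKey1 (pvSplitDot s)) := by
  rw [PySem.List.sorted_eq_foldl_insertBy]
  unfold extsort_alt
  induction list using List.reverseRecOn with
  | nil => rfl
  | append_singleton xs x ih =>
      rw [List.foldl_append, List.foldl_append, ih]
      exact pvInsertKeyed_eq_insertBy x _

-- ===== VERDICT (by name: the statement is the Claim_ definition above) =====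
theorem extsort_spec : Claim_equal_extsort := by
  intro list _ _
  unfold Spec_extsort
  rw [extsort_eq_sorted, extsort_alt_eq_sorted]
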